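-- pv_equiv track=rewrite | github.com/ravescovi/bait-chat | src/bait_mcp/server.py | _get_advanced_recommendations
-- ===== SOURCE A (Python) =====
-- def _get_smart_plan_example(plan_name: str, parameters: list, available_devices: dict) -> str:
--     """Generate smart example usage with actual available devices"""
--     if not parameters:
--         return f"{plan_name}()"
--
--     param_examples = []
--     for param in parameters:
--         param_name = param.get("name", "param")
--         suggestions = param.get("suggestions", [])
--
--         if suggestions:
--             param_examples.append(str(suggestions[0]))
--         elif "detector" in param_name.lower() or param_name == "detectors":
--             detectors = available_devices.get("detectors", ["sim_det"])
--             param_examples.append(f"[{detectors[0]}]")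
--         elif "motor" in param_name.lower():
--             motors = available_devices.get("motors", ["sim_motor"])
--             param_examples.append(motors[0])
--         elif param_name in ["start", "stop"]:
--             param_examples.append("-1" if param_name == "start" else "1")
--         elif param_name == "num":
--             param_examples.append("11")
--         elif param_name == "delay":
--             param_examples.append("None")
--         else:
--             param_examples.append(f"<{param_name}>")
--
--     return f"{plan_name}({', '.join(param_examples)})"
--
-- def _get_advanced_recommendations(plans_dict: dict, available_devices: dict) -> list:
--     """Get plan recommendations for advanced users"""
--     advanced_patterns = ["grid", "adaptive", "tune", "align", "calibrat"]
--     recommendations = []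
--
--     for pattern in advanced_patterns:
--         for plan_name in plans_dict.keys():
--             if pattern in plan_name.lower():
--                 example = _get_smart_plan_example(plan_name, [], available_devices)
--                 recommendations.append(
--                     {
--                         "name": plan_name,
--                         "reason": f"Advanced {pattern} functionality",
--                         "example": example,
--                         "difficulty": "advanced",
--                     }
--                 )
--                 break
--
--     return recommendations
-- ===== SOURCE B (Python) =====
-- def _get_advanced_recommendations(plans_dict: dict, available_devices: dict) -> list:
--     """Get plan recommendations for advanced users.
--
--     Single pass over the plans: remember the first plan matching each pattern,
--     then emit the recommendations in pattern order.  (With no parameters the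
--     smart example is always just f"{name}()".)
--     """
--     m_grid = m_adaptive = m_tune = m_align = m_calibrat = None
--     for plan_name in plans_dict.keys():
--         low = plan_name.lower()
--         if m_grid is None and "grid" in low:
--             m_grid = plan_name
--         if m_adaptive is None and "adaptive" in low:
--             m_adaptive = plan_name
--         if m_tune is None and "tune" in low:
--             m_tune = plan_name
--         if m_align is None and "align" in low:
--             m_align = plan_name
--         if m_calibrat is None and "calibrat" in low:
--             m_calibrat = plan_name
--
--     recommendations = []
--     for pattern, match in [
--         ("grid", m_grid),
--         ("adaptive", m_adaptive),
--         ("tune", m_tune),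
--         ("align", m_align),
--         ("calibrat", m_calibrat),
--     ]:
--         if match is not None:
--             recommendations.append(
--                 {
--                     "name": match,
--                     "reason": f"Advanced {pattern} functionality",
--                     "example": f"{match}()",
--                     "difficulty": "advanced",
--                 }
--             )
--     return recommendations
-- ===== Notes on version B (the rewrite author's own statement) =====
-- stated objective: alternative
-- what changed: Replaces A's per-pattern rescans of the plan dict (one scan with break per pattern) by a single pass over the plans that records the first match for each of the five patterns, followed by an emit loop in pattern order.
import Mathlib
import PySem

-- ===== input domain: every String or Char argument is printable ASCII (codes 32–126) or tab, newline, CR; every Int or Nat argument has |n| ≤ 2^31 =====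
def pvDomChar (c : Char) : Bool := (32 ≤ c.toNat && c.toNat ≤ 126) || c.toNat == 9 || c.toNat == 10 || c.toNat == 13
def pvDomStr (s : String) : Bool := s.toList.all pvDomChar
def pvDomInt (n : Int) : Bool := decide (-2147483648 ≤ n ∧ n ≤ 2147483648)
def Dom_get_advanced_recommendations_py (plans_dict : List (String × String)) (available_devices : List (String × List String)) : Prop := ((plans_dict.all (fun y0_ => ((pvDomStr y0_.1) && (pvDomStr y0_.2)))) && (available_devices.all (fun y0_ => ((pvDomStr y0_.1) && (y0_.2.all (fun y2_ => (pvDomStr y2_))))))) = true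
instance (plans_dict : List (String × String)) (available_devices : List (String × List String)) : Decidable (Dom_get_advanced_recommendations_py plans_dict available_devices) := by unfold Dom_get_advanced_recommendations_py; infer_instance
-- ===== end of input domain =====

-- B replaces A's one-scan-per-pattern search by a single pass over the plans recording the
-- first match per pattern (objective: alternative decomposition, same worst-case cost).

-- ===== PORT A =====
def pvAdvPatterns : List String := ["grid", "adaptive", "tune", "align", "calibrat"]

-- A calls _get_smart_plan_example with parameters = []; that call always takes the
-- 'if not parameters' branch and returns f"{plan_name}()", which is all this port needs.
def smart_plan_example_py (plan_name : String) (available_devices : List (String × List String)) : String :=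
  plan_name ++ "()"

-- 'for plan_name in plans_dict.keys(): if pattern in plan_name.lower(): …; break' = first match (List.find?)
def get_advanced_recommendations_py (plans_dict : List (String × String)) (available_devices : List (String × List String)) : List (List (String × String)) :=
  pvAdvPatterns.foldl (fun recommendations pattern =>
    match (PySem.Dict.ofList plans_dict).keys.find?
        (fun plan_name => PySem.Str.isIn pattern (PySem.Str.lower plan_name)) with
    | some plan_name =>
        recommendations ++ [[("name", plan_name),
          ("reason", "Advanced " ++ pattern ++ " functionality"),
          ("example", smart_plan_example_py plan_name available_devices),
          ("difficulty", "advanced")]]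
    | none => recommendations) []

-- ===== PORT B =====
-- one step of B's single pass: update the five 'first match' slots for one plan name
def pvStepB (st : Option String × Option String × Option String × Option String × Option String)
    (k : String) : Option String × Option String × Option String × Option String × Option String :=
  let low := PySem.Str.lower k
  (if st.1 = none ∧ PySem.Str.isIn "grid" low then some k else st.1,
   if st.2.1 = none ∧ PySem.Str.isIn "adaptive" low then some k else st.2.1,
   if st.2.2.1 = none ∧ PySem.Str.isIn "tune" low then some k else st.2.2.1,
   if st.2.2.2.1 = none ∧ PySem.Str.isIn "align" low then some k else st.2.2.2.1,
   if st.2.2.2.2 = none ∧ PySem.Str.isIn "calibrat" low then some k else st.2.2.2.2)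

def get_advanced_recommendations_py_alt (plans_dict : List (String × String)) (available_devices : List (String × List String)) : List (List (String × String)) :=
  let m := (PySem.Dict.ofList plans_dict).keys.foldl pvStepB (none, none, none, none, none)
  [("grid", m.1), ("adaptive", m.2.1), ("tune", m.2.2.1), ("align", m.2.2.2.1), ("calibrat", m.2.2.2.2)].foldl
    (fun recommendations pm =>
      match pm.2 with
      | some name =>
          recommendations ++ [[("name", name),
            ("reason", "Advanced " ++ pm.1 ++ " functionality"),
            ("example", name ++ "()"),
            ("difficulty", "advanced")]]
      | none => recommendations) []

-- ===== PRECONDITION & SPEC =====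
def Spec_get_advanced_recommendations_py (plans_dict : List (String × String)) (available_devices : List (String × List String)) (out : List (List (String × String))) : Prop := out = get_advanced_recommendations_py_alt plans_dict available_devices
instance (plans_dict : List (String × String)) (available_devices : List (String × List String)) (out : List (List (String × String))) : Decidable (Spec_get_advanced_recommendations_py plans_dict available_devices out) := by unfold Spec_get_advanced_recommendations_py; infer_instance

-- ===== CLAIM (what is proved, stated in full; the proofs are below) =====
def Claim_equal_get_advanced_recommendations_py : Prop := ∀ (plans_dict : List (String × String)) (available_devices : List (String × List String)), Dom_get_advanced_recommendations_py plans_dict available_devices → Spec_get_advanced_recommendations_py plans_dict available_devices (get_advanced_recommendations_py plans_dict available_devices)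

-- ===== LEMMAS AND PROOFS =====
-- one slot of B's step, pushed through Option.or with the rest of the scan
theorem pv_or_step (a : Option String) (k : String) (keys : List String) (pr : String → Bool) :
    (if a = none ∧ pr k = true then some k else a).or (keys.find? pr) = a.or ((k :: keys).find? pr) := by
  cases a with
  | some v => simp
  | none => by_cases h : pr k <;> simp [List.find?, h]

-- B's single pass computes, in each slot, the first plan name matching that pattern
theorem pv_fold5 (keys : List String) (a b c d e : Option String) :
    keys.foldl pvStepB (a, b, c, d, e) =
      (a.or (keys.find? (fun k => PySem.Str.isIn "grid" (PySem.Str.lower k))),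
       b.or (keys.find? (fun k => PySem.Str.isIn "adaptive" (PySem.Str.lower k))),
       c.or (keys.find? (fun k => PySem.Str.isIn "tune" (PySem.Str.lower k))),
       d.or (keys.find? (fun k => PySem.Str.isIn "align" (PySem.Str.lower k))),
       e.or (keys.find? (fun k => PySem.Str.isIn "calibrat" (PySem.Str.lower k)))) := by
  induction keys generalizing a b c d e with
  | nil => simp
  | cons k keys ih =>
    rw [List.foldl_cons, show pvStepB (a, b, c, d, e) k =
      ((if a = none ∧ PySem.Str.isIn "grid" (PySem.Str.lower k) = true then some k else a),
       (if b = none ∧ PySem.Str.isIn "adaptive" (PySem.Str.lower k) = true then some k else b),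
       (if c = none ∧ PySem.Str.isIn "tune" (PySem.Str.lower k) = true then some k else c),
       (if d = none ∧ PySem.Str.isIn "align" (PySem.Str.lower k) = true then some k else d),
       (if e = none ∧ PySem.Str.isIn "calibrat" (PySem.Str.lower k) = true then some k else e)) from rfl,
      ih]
    simp only [Prod.mk.injEq]
    exact ⟨pv_or_step a k keys (fun k => PySem.Str.isIn "grid" (PySem.Str.lower k)),
      pv_or_step b k keys (fun k => PySem.Str.isIn "adaptive" (PySem.Str.lower k)),
      pv_or_step c k keys (fun k => PySem.Str.isIn "tune" (PySem.Str.lower k)),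
      pv_or_step d k keys (fun k => PySem.Str.isIn "align" (PySem.Str.lower k)),
      pv_or_step e k keys (fun k => PySem.Str.isIn "calibrat" (PySem.Str.lower k))⟩

-- ===== VERDICT (by name: the statement is the Claim_ definition above) =====
theorem get_advanced_recommendations_py_spec : Claim_equal_get_advanced_recommendations_py := by
  intro plans_dict available_devices _
  unfold Spec_get_advanced_recommendations_py get_advanced_recommendations_py
    get_advanced_recommendations_py_alt
  rw [pv_fold5]
  simp [pvAdvPatterns, smart_plan_example_py, List.foldl]
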